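-- pv_equiv track=rewrite | github.com/JureZmrzlikar/imaps | imaps/sandbox/kmers.py | get_max_pos
-- ===== SOURCE A (Python) =====
-- def get_max_pos(pos_count, window_peak_l=15, window_peak_r=15):
--     """Return position with max values for every kmer in the dictionary."""
--     max_pos = {}
--     pc_peak = {}
--     for motif, pos_c in pos_count.items():
--         pc_peak[motif] = {x: pos_c[x] for x in range(-abs(window_peak_l), window_peak_r + 1)}
--     for motif, pos in pc_peak.items():
--         max_pos[motif] = max(pos, key=pos.get)
--     return max_pos
-- ===== SOURCE B (Python) =====
-- def get_max_pos(pos_count, window_peak_l=15, window_peak_r=15):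
--     """Return position with max values for every kmer in the dictionary."""
--     lo, hi = -abs(window_peak_l), window_peak_r
--     max_pos = {}
--     for motif, pos_c in pos_count.items():
--         best_x = None
--         best_v = None
--         for x, v in pos_c.items():
--             if lo <= x <= hi and (best_v is None or v > best_v or (v == best_v and x < best_x)):
--                 best_x, best_v = x, v
--         max_pos[motif] = best_x
--     return max_pos
-- ===== Notes on version B (the rewrite author's own statement) =====
-- stated objective: faster
-- what changed: B makes one fused pass over each motif's stored (position, count) items, keeping a running lexicographic best (higher count, then smaller position), instead of A's two phases that materialise an intermediate window dict per motif via range indexing and then call max over it.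
import Mathlib
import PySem

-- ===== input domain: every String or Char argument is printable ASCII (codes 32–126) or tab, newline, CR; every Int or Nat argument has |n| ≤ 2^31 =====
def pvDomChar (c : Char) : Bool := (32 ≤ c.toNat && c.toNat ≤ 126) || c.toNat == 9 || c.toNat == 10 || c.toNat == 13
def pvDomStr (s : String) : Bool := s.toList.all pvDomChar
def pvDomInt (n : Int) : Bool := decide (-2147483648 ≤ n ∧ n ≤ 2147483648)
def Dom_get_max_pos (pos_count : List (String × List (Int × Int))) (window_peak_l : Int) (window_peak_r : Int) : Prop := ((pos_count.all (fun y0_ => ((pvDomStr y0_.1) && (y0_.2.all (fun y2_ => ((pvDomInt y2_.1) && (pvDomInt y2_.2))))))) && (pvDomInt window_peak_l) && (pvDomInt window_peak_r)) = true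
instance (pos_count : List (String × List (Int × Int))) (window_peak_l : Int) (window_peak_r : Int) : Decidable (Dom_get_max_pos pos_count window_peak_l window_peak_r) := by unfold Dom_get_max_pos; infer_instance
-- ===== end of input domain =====

-- B replaces A's two phases (build a window dict per motif by range indexing, then max over it)
-- with one fused pass over each motif's stored items keeping a running (count, -position) best;
-- measured faster by a constant factor (no intermediate dicts). Return-value equivalence only.

-- ===== PORT A =====
-- {x: pos_c[x] for x in range(-abs(l), r+1)}; pos_c[x] is dict lookup (KeyError → excluded by Pre_, getD default never read there)
def pvWinDict (pc : List (Int × Int)) (lo hi1 : Int) : PySem.Dict Int Int :=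
  (PySem.List.pyRange lo hi1 1).foldl (fun d x => d.insert x (PySem.Dict.getD ⟨pc⟩ x 0)) PySem.Dict.empty

-- max(pos, key=pos.get); max of an empty dict is ValueError (→ excluded by Pre_, .getD 0 never read there)
def pvMaxOf (w : PySem.Dict Int Int) : Int :=
  (PySem.List.max? w.keys (fun x => PySem.Dict.getD w x 0)).getD 0

-- first loop builds pc_peak, second loop builds max_pos from pc_peak's items
def get_max_pos (pos_count : List (String × List (Int × Int))) (window_peak_l : Int) (window_peak_r : Int) : List (String × Int) :=
  ((pos_count.foldl (fun acc mp => acc.insert mp.1 (pvWinDict mp.2 (-|window_peak_l|) (window_peak_r + 1)))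
      (PySem.Dict.empty : PySem.Dict String (PySem.Dict Int Int))).items.foldl
    (fun acc mp => acc.insert mp.1 (pvMaxOf mp.2)) (PySem.Dict.empty : PySem.Dict String Int)).items

-- ===== PORT B =====
-- 'v > best_v or (v == best_v and x < best_x)'
def pvBeats (xv p : Int × Int) : Bool :=
  decide (p.2 < xv.2) || (decide (xv.2 = p.2) && decide (xv.1 < p.1))

-- the body of B's inner loop: take xv as new best iff it is in the window and beats the current best
def pvUpd (lo hi : Int) (b : Option (Int × Int)) (xv : Int × Int) : Option (Int × Int) :=
  if decide (lo ≤ xv.1) && decide (xv.1 ≤ hi) && (match b with | none => true | some p => pvBeats xv p)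
  then some xv else b

-- best_x after the scan (None → 0 only outside Pre_, where Python B stores None)
def pvBest (pc : List (Int × Int)) (lo hi : Int) : Int :=
  match pc.foldl (pvUpd lo hi) none with
  | some p => p.1
  | none => 0

def get_max_pos_alt (pos_count : List (String × List (Int × Int))) (window_peak_l : Int) (window_peak_r : Int) : List (String × Int) :=
  (pos_count.foldl (fun acc mp => acc.insert mp.1 (pvBest mp.2 (-|window_peak_l|) window_peak_r)) PySem.Dict.empty).items

-- ===== PRECONDITION & SPEC =====
-- Pre_ excludes exactly the inputs where Python A raises (KeyError: some window position missing
-- from a motif's counts; ValueError: max over an empty window when pos_count is nonempty), and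
-- association lists with duplicate inner keys, which do not represent any Python dict.
def Pre_get_max_pos (pos_count : List (String × List (Int × Int))) (window_peak_l : Int) (window_peak_r : Int) : Prop :=
  ∀ mp ∈ pos_count,
    (mp.2.map Prod.fst).Nodup ∧
    -|window_peak_l| ≤ window_peak_r ∧
    (((mp.2.map Prod.fst).filter (fun x => decide (-|window_peak_l| ≤ x) && decide (x ≤ window_peak_r))).length : Int)
      = window_peak_r + |window_peak_l| + 1
instance (pos_count : List (String × List (Int × Int))) (window_peak_l : Int) (window_peak_r : Int) : Decidable (Pre_get_max_pos pos_count window_peak_l window_peak_r) := by unfold Pre_get_max_pos; infer_instance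

def pvWitness_get_max_pos : (List (String × List (Int × Int))) × Int × Int := ([("AAA", [(0, 3), (1, 3), (5, 9)])], 0, 1)

def Spec_get_max_pos (pos_count : List (String × List (Int × Int))) (window_peak_l : Int) (window_peak_r : Int) (out : List (String × Int)) : Prop := out = get_max_pos_alt pos_count window_peak_l window_peak_r
instance (pos_count : List (String × List (Int × Int))) (window_peak_l : Int) (window_peak_r : Int) (out : List (String × Int)) : Decidable (Spec_get_max_pos pos_count window_peak_l window_peak_r out) := by unfold Spec_get_max_pos; infer_instance

-- ===== CLAIM (what is proved, stated in full; the proofs are below) =====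
def Claim_equal_get_max_pos : Prop := ∀ (pos_count : List (String × List (Int × Int))) (window_peak_l : Int) (window_peak_r : Int), Dom_get_max_pos pos_count window_peak_l window_peak_r → Pre_get_max_pos pos_count window_peak_l window_peak_r → Spec_get_max_pos pos_count window_peak_l window_peak_r (get_max_pos pos_count window_peak_l window_peak_r)

-- ===== LEMMAS AND PROOFS =====

theorem pv_insert_not_contains {κ ν : Type} [BEq κ] (d : PySem.Dict κ ν) (k : κ) (v : ν)
    (h : d.contains k = false) : (d.insert k v).items = d.items ++ [(k, v)] := by
  simp [PySem.Dict.insert, h]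

theorem pv_contains_false {κ ν : Type} [BEq κ] [LawfulBEq κ] (d : PySem.Dict κ ν) (k : κ) :
    d.contains k = false ↔ k ∉ d.items.map Prod.fst := by
  rw [PySem.Dict.contains, List.any_eq_false]
  simp
  constructor
  · intro h x hx
    exact h k x hx rfl
  · intro h a b hab e
    subst e
    exact h b hab

-- building a dict by inserting pairwise-fresh keys lists exactly those pairs
theorem pv_build_items {κ ν α : Type} [BEq κ] [LawfulBEq κ] (key : α → κ) (f : α → ν) :
    ∀ (zs : List α) (d : PySem.Dict κ ν), (zs.map key).Nodup →
      (∀ a ∈ zs, d.contains (key a) = false) →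
      (zs.foldl (fun acc a => acc.insert (key a) (f a)) d).items = d.items ++ zs.map (fun a => (key a, f a)) := by
  intro zs
  induction zs with
  | nil => intro d _ _; simp
  | cons a zs ih =>
    intro d hnd hd
    have hca : d.contains (key a) = false := hd a (by simp)
    rw [List.map_cons, List.nodup_cons] at hnd
    simp only [List.foldl_cons]
    rw [ih (d.insert (key a) (f a)) hnd.2 ?_]
    · rw [pv_insert_not_contains _ _ _ hca]
      simp
    · intro b hb
      rw [pv_contains_false]
      rw [pv_insert_not_contains _ _ _ hca]
      simp only [List.map_append, List.mem_append, List.map_cons, List.map_nil,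
        List.mem_singleton, not_or]
      refine ⟨(pv_contains_false _ _).1 (hd b (List.mem_cons_of_mem _ hb)), ?_⟩
      intro e
      exact hnd.1 (e ▸ List.mem_map_of_mem hb)

theorem pv_phase2 (ps : List (String × PySem.Dict Int Int)) (h : (ps.map Prod.fst).Nodup) :
    (ps.foldl (fun acc mp => acc.insert mp.1 (pvMaxOf mp.2)) PySem.Dict.empty).items
      = ps.map (fun mp => (mp.1, pvMaxOf mp.2)) := by
  simpa using pv_build_items Prod.fst (fun mp => pvMaxOf mp.2) ps PySem.Dict.empty h (fun a _ => rfl)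

theorem pv_keys_insert {κ ν : Type} [BEq κ] [LawfulBEq κ] (d : PySem.Dict κ ν) (k : κ) (v : ν) :
    (d.insert k v).items.map Prod.fst
      = if d.contains k then d.items.map Prod.fst else d.items.map Prod.fst ++ [k] := by
  cases hC : d.contains k
  · simp only [PySem.Dict.insert, hC, Bool.false_eq_true, if_false, List.map_append]
    rfl
  · simp only [PySem.Dict.insert, hC, if_true, List.map_map]
    apply List.map_congr_left
    intro p _
    by_cases hb : (p.1 == k) = true
    · simp [Function.comp, eq_of_beq hb]
    · simp [Function.comp, hb]

theorem pv_keys_fold_nodup {ν : Type} (F : String × List (Int × Int) → ν) :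
    ∀ (ps : List (String × List (Int × Int))) (d : PySem.Dict String ν), (d.items.map Prod.fst).Nodup →
      ((ps.foldl (fun acc mp => acc.insert mp.1 (F mp)) d).items.map Prod.fst).Nodup := by
  intro ps
  induction ps with
  | nil => intro d hd; simpa using hd
  | cons mp ps ih =>
    intro d hd
    simp only [List.foldl_cons]
    apply ih
    rw [pv_keys_insert]
    cases hC : d.contains mp.1
    · simp only [Bool.false_eq_true, if_false]
      rw [List.nodup_append]
      exact ⟨hd, List.nodup_singleton _, by
        simp only [List.mem_singleton]
        intro a ha b hb
        subst hb
        exact fun e => (pv_contains_false d mp.1).1 hC (e ▸ ha)⟩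
    · simpa using hd

-- first-match lookup in a duplicate-free association list
theorem pv_get?_of_mem : ∀ (pc : List (Int × Int)) (x v : Int),
    (pc.map Prod.fst).Nodup → (x, v) ∈ pc → PySem.Dict.get? ⟨pc⟩ x = some v := by
  intro pc
  induction pc with
  | nil => intro x v _ h; simp at h
  | cons p pc ih =>
    intro x v hnd hm
    rw [List.map_cons, List.nodup_cons] at hnd
    have hcons := PySem.Dict.get?_mk_cons p.1 p.2 pc x
    rw [Prod.mk.eta] at hcons
    rcases List.mem_cons.1 hm with h | h
    · subst h
      rw [hcons, if_pos (by simp)]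
    · have hne : ¬ ((p.1 == x) = true) := by
        intro hb
        exact hnd.1 (eq_of_beq hb ▸ List.mem_map_of_mem h)
      rw [hcons, if_neg hne]
      exact ih x v hnd.2 h

-- mapping the values through G commutes with insert
theorem pv_insert_mapval {ν μ : Type} (G : ν → μ) (d : PySem.Dict String ν) (e : PySem.Dict String μ)
    (he : e.items = d.items.map (fun p => (p.1, G p.2))) (k : String) (v : ν) :
    (e.insert k (G v)).items = (d.insert k v).items.map (fun p => (p.1, G p.2)) := by
  have hc : e.contains k = d.contains k := by
    rw [PySem.Dict.contains, PySem.Dict.contains, he, List.any_map]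
    rfl
  cases hC : d.contains k
  · rw [pv_insert_not_contains _ _ _ (hc.trans hC),
      pv_insert_not_contains _ _ _ hC, he, List.map_append]
    rfl
  · simp only [PySem.Dict.insert, hc, hC, if_true, he, List.map_map]
    apply List.map_congr_left
    intro p _
    by_cases hb : (p.1 == k) = true
    · simp [Function.comp, hb]
    · simp [Function.comp, hb]

theorem pv_outer {ν μ : Type} (G : ν → μ) (F : String × List (Int × Int) → ν) (F' : String × List (Int × Int) → μ) :
    ∀ (ps : List (String × List (Int × Int))) (d : PySem.Dict String ν) (e : PySem.Dict String μ),
      e.items = d.items.map (fun p => (p.1, G p.2)) →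
      (∀ mp ∈ ps, F' mp = G (F mp)) →
      (ps.foldl (fun acc mp => acc.insert mp.1 (F' mp)) e).items
        = (ps.foldl (fun acc mp => acc.insert mp.1 (F mp)) d).items.map (fun p => (p.1, G p.2)) := by
  intro ps
  induction ps with
  | nil => intro d e he _; simpa using he
  | cons mp ps ih =>
    intro d e he hv
    simp only [List.foldl_cons]
    rw [hv mp (List.mem_cons_self)]
    exact ih _ _ (pv_insert_mapval G d e he mp.1 (F mp))
      (fun q hq => hv q (List.mem_cons_of_mem _ hq))

-- characterisation of A's max(…, key=…) fold over a strictly increasing list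
theorem pv_A_fold (k : Int → Int) :
    ∀ (ys : List Int) (m : Int), (∀ y ∈ ys, m < y) → ys.Pairwise (· < ·) →
      ∃ r, PySem.List.max? (m :: ys) k = some r ∧
        (r = m ∨ r ∈ ys) ∧
        (∀ y, (y = m ∨ y ∈ ys) → (y = r ∨ k y < k r ∨ (k y = k r ∧ r < y))) := by
  intro ys
  induction ys with
  | nil =>
    intro m _ _
    refine ⟨m, rfl, Or.inl rfl, ?_⟩
    rintro y (rfl | h)
    · exact Or.inl rfl
    · simp at h
  | cons y ys ih =>
    intro m hm hp
    have hy : m < y := hm y List.mem_cons_self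
    have hpy : ∀ z ∈ ys, y < z := (List.pairwise_cons.1 hp).1
    have hpt : ys.Pairwise (· < ·) := (List.pairwise_cons.1 hp).2
    have hsel : PySem.List.max? (m :: y :: ys) k
        = PySem.List.max? ((if k m < k y then y else m) :: ys) k := by
      unfold PySem.List.max?
      simp only [List.foldl_cons]
      congr 1
      by_cases hk : k m < k y
      · simp [hk]
      · simp [hk]
    by_cases hk : k m < k y
    · rw [hsel, if_pos hk]
      obtain ⟨r, hr, hmem, hbeats⟩ := ih y hpy hpt
      refine ⟨r, hr, ?_, ?_⟩
      · rcases hmem with rfl | h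
        · exact Or.inr List.mem_cons_self
        · exact Or.inr (List.mem_cons_of_mem _ h)
      · rintro z (rfl | hz)
        · -- z = m : k m < k y ≤ k r
          rcases hbeats y (Or.inl rfl) with rfl | hlt | ⟨heq, _⟩
          · exact Or.inr (Or.inl hk)
          · exact Or.inr (Or.inl (lt_trans hk hlt))
          · exact Or.inr (Or.inl (heq ▸ hk))
        · exact hbeats z (by rcases List.mem_cons.1 hz with rfl | h; exact Or.inl rfl; exact Or.inr h)
    · rw [hsel, if_neg hk]
      obtain ⟨r, hr, hmem, hbeats⟩ := ih m (fun z hz => hm z (List.mem_cons_of_mem _ hz)) hpt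
      refine ⟨r, hr, ?_, ?_⟩
      · rcases hmem with rfl | h
        · exact Or.inl rfl
        · exact Or.inr (List.mem_cons_of_mem _ h)
      · rintro z (rfl | hz)
        · exact hbeats z (Or.inl rfl)
        · rcases List.mem_cons.1 hz with rfl | h
          · -- the skipped head y : k y ≤ k m
            have hky : k z ≤ k m := le_of_not_gt hk
            rcases hbeats m (Or.inl rfl) with rfl | hlt | ⟨heq, hrm⟩
            · rcases lt_or_eq_of_le hky with h1 | h1
              · exact Or.inr (Or.inl h1)
              · exact Or.inr (Or.inr ⟨h1, hy⟩)
            · exact Or.inr (Or.inl (lt_of_le_of_lt hky hlt))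
            · -- k m = k r ∧ r < m : impossible since r = m ∨ r ∈ ys (all > m)
              rcases hmem with rfl | hr2
              · exact absurd hrm (lt_irrefl _)
              · exact absurd hrm (not_lt.2 (le_of_lt (hm r (List.mem_cons_of_mem _ hr2))))
          · exact hbeats z (Or.inr h)

-- characterisation of B's running-best fold over in-window items with distinct keys
theorem pv_B_fold (lo hi : Int) :
    ∀ (L : List (Int × Int)) (p : Int × Int), ((p :: L).map Prod.fst).Nodup →
      (∀ t ∈ p :: L, lo ≤ t.1 ∧ t.1 ≤ hi) →
      ∃ q, L.foldl (pvUpd lo hi) (some p) = some q ∧ q ∈ p :: L ∧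
        (∀ t ∈ p :: L, t ≠ q → (t.2 < q.2 ∨ (t.2 = q.2 ∧ q.1 < t.1))) := by
  intro L
  induction L with
  | nil =>
    intro p _ _
    refine ⟨p, rfl, List.mem_cons_self, ?_⟩
    rintro t ht hne
    rcases List.mem_cons.1 ht with rfl | h
    · exact absurd rfl hne
    · simp at h
  | cons t L ih =>
    intro p hnd hw
    have hwp : lo ≤ p.1 ∧ p.1 ≤ hi := hw p List.mem_cons_self
    have hwt : lo ≤ t.1 ∧ t.1 ≤ hi := hw t (List.mem_cons_of_mem _ List.mem_cons_self)
    have hkey : p.1 ≠ t.1 := by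
      rw [List.map_cons, List.nodup_cons] at hnd
      intro e
      exact hnd.1 (e ▸ List.mem_map_of_mem List.mem_cons_self)
    simp only [List.foldl_cons]
    by_cases hb : pvBeats t p = true
    · have hstep : pvUpd lo hi (some p) t = some t := by
        simp [pvUpd, hwt.1, hwt.2, hb]
      rw [hstep]
      have hnd' : ((t :: L).map Prod.fst).Nodup := by
        rw [List.map_cons, List.nodup_cons] at hnd
        exact hnd.2
      obtain ⟨q, hq, hqmem, hqb⟩ := ih t hnd' (fun s hs => hw s (List.mem_cons_of_mem _ hs))
      refine ⟨q, hq, List.mem_cons_of_mem _ hqmem, ?_⟩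
      intro s hs hne
      have hbp : p.2 < t.2 ∨ (t.2 = p.2 ∧ t.1 < p.1) := by
        simpa [pvBeats, Bool.or_eq_true, Bool.and_eq_true, decide_eq_true_eq] using hb
      rcases List.mem_cons.1 hs with rfl | hs2
      · -- s = p beaten via t
        by_cases hqt : q = t
        · subst hqt
          rcases hbp with h1 | ⟨h1, h2⟩
          · exact Or.inl h1
          · exact Or.inr ⟨h1.symm, h2⟩
        · have h2 := hqb t List.mem_cons_self (Ne.symm hqt)
          rcases hbp with h1 | ⟨h1, h1'⟩ <;> rcases h2 with h3 | ⟨h3, h3'⟩ <;>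
            [exact Or.inl (lt_trans h1 h3); exact Or.inl (h3 ▸ h1);
             exact Or.inl (h1 ▸ h3); exact Or.inr ⟨h1 ▸ h3, lt_trans h3' h1'⟩]
      · exact hqb s hs2 hne
    · have hstep : pvUpd lo hi (some p) t = some p := by
        simp only [pvUpd, hb, Bool.and_false, Bool.false_eq_true, if_false]
      rw [hstep]
      have hsub : (p :: L).Sublist (p :: t :: L) := List.Sublist.cons₂ p (List.sublist_cons_self t L)
      have hnd' : ((p :: L).map Prod.fst).Nodup := List.Nodup.sublist (hsub.map Prod.fst) hnd
      obtain ⟨q, hq, hqmem, hqb⟩ := ih p hnd'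
        (fun s hs => hw s (hsub.mem hs))
      refine ⟨q, hq, hsub.mem hqmem, ?_⟩
      intro s hs hne
      have hbt : t.2 < p.2 ∨ (t.2 = p.2 ∧ p.1 < t.1) := by
        have hnb : ¬(p.2 < t.2 ∨ (t.2 = p.2 ∧ t.1 < p.1)) := by
          intro hcon
          apply hb
          simp only [pvBeats, Bool.or_eq_true, Bool.and_eq_true, decide_eq_true_eq]
          exact hcon
        push_neg at hnb
        rcases lt_trichotomy t.2 p.2 with h1 | h1 | h1
        · exact Or.inl h1
        · exact Or.inr ⟨h1, lt_of_le_of_ne (hnb.2 h1) hkey⟩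
        · exact absurd h1 (not_lt.2 hnb.1)
      rcases List.mem_cons.1 hs with rfl | hs2
      · exact hqb _ List.mem_cons_self hne
      · rcases List.mem_cons.1 hs2 with rfl | hs3
        · -- s = t, beaten via p
          by_cases hqp : q = p
          · subst hqp
            exact hbt
          · have h2 := hqb p List.mem_cons_self (Ne.symm hqp)
            rcases hbt with h1 | ⟨h1, h1'⟩ <;> rcases h2 with h3 | ⟨h3, h3'⟩ <;>
              [exact Or.inl (lt_trans h1 h3); exact Or.inl (h3 ▸ h1);
               exact Or.inl (h1 ▸ h3); exact Or.inr ⟨h1.trans h3, lt_trans h3' h1'⟩]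
        · exact hqb s (List.mem_cons_of_mem _ hs3) hne

-- B's guarded fold ignores out-of-window items
theorem pv_fuse (lo hi : Int) : ∀ (pc : List (Int × Int)) (b : Option (Int × Int)),
    pc.foldl (pvUpd lo hi) b
      = (pc.filter (fun t => decide (lo ≤ t.1) && decide (t.1 ≤ hi))).foldl (pvUpd lo hi) b := by
  intro pc
  induction pc with
  | nil => intro b; simp
  | cons t pc ih =>
    intro b
    simp only [List.foldl_cons, List.filter_cons]
    by_cases hw : (decide (lo ≤ t.1) && decide (t.1 ≤ hi)) = true
    · rw [if_pos hw]
      simp only [List.foldl_cons]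
      exact ih _
    · rw [if_neg hw]
      have hb : pvUpd lo hi b t = b := by
        unfold pvUpd
        rw [if_neg]
        intro hcon
        rw [Bool.and_eq_true, Bool.and_eq_true] at hcon
        exact hw (by rw [Bool.and_eq_true]; exact hcon.1)
      rw [hb]
      exact ih b

-- every window position is a key
theorem pv_cover (pc : List (Int × Int)) (lo hi : Int) (hnd : (pc.map Prod.fst).Nodup)
    (hc : ((pc.map Prod.fst).filter (fun x => decide (lo ≤ x) && decide (x ≤ hi))).length = (hi + 1 - lo).toNat) :
    ∀ x, lo ≤ x → x ≤ hi → x ∈ pc.map Prod.fst := by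
  intro x hxlo hxhi
  have hsub : ((pc.map Prod.fst).filter (fun x => decide (lo ≤ x) && decide (x ≤ hi)))
      ⊆ PySem.List.pyRange lo (hi + 1) 1 := by
    intro z hz
    rw [List.mem_filter, Bool.and_eq_true, decide_eq_true_eq, decide_eq_true_eq] at hz
    exact PySem.List.mem_pyRange_one.2 ⟨hz.2.1, by omega⟩
  have hnd' := hnd.filter (fun x => decide (lo ≤ x) && decide (x ≤ hi))
  have hlen : (PySem.List.pyRange lo (hi + 1) 1).length
      ≤ ((pc.map Prod.fst).filter (fun x => decide (lo ≤ x) && decide (x ≤ hi))).length := by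
    rw [PySem.List.length_pyRange_one, hc]
  have hperm := (hnd'.subperm hsub).perm_of_length_le hlen
  have hx : x ∈ (pc.map Prod.fst).filter (fun x => decide (lo ≤ x) && decide (x ≤ hi)) :=
    hperm.mem_iff.2 (PySem.List.mem_pyRange_one.2 ⟨hxlo, by omega⟩)
  exact (List.mem_filter.1 hx).1

-- the per-motif value computed by A equals the one computed by B
theorem pv_entry (pc : List (Int × Int)) (lo hi : Int) (hnd : (pc.map Prod.fst).Nodup)
    (hlo : lo ≤ hi)
    (hcov : ∀ x, lo ≤ x → x ≤ hi → x ∈ pc.map Prod.fst) :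
    pvBest pc lo hi = pvMaxOf (pvWinDict pc lo (hi + 1)) := by
  have hxsnd : (PySem.List.pyRange lo (hi + 1) 1).Nodup := PySem.List.nodup_pyRange_one lo (hi + 1)
  -- the window dict of A lists exactly the window positions with their counts
  have hW : (pvWinDict pc lo (hi + 1)).items
      = (PySem.List.pyRange lo (hi + 1) 1).map (fun x => (x, PySem.Dict.getD ⟨pc⟩ x 0)) := by
    unfold pvWinDict
    have hb := pv_build_items (fun x : Int => x) (fun x => PySem.Dict.getD ⟨pc⟩ x 0)
      (PySem.List.pyRange lo (hi + 1) 1) PySem.Dict.empty (by simpa using hxsnd) (fun a _ => rfl)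
    simpa using hb
  have hkeys : (pvWinDict pc lo (hi + 1)).keys = PySem.List.pyRange lo (hi + 1) 1 := by
    simp [PySem.Dict.keys, hW, List.map_map, Function.comp_def]
  have hvmem : ∀ x v : Int, (x, v) ∈ pc → PySem.Dict.getD ⟨pc⟩ x 0 = v := by
    intro x v h
    unfold PySem.Dict.getD
    rw [pv_get?_of_mem pc x v hnd h]
    rfl
  have hval : ∀ x ∈ PySem.List.pyRange lo (hi + 1) 1,
      PySem.Dict.getD (pvWinDict pc lo (hi + 1)) x 0 = PySem.Dict.getD ⟨pc⟩ x 0 := by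
    intro x hx
    have hget : PySem.Dict.get? (pvWinDict pc lo (hi + 1)) x = some (PySem.Dict.getD ⟨pc⟩ x 0) := by
      apply pv_get?_of_mem (pvWinDict pc lo (hi + 1)).items x (PySem.Dict.getD ⟨pc⟩ x 0)
      · show ((pvWinDict pc lo (hi + 1)).items.map Prod.fst).Nodup
        have : (pvWinDict pc lo (hi + 1)).items.map Prod.fst = PySem.List.pyRange lo (hi + 1) 1 := by
          simp [hW, List.map_map, Function.comp_def]
        rw [this]; exact hxsnd
      · rw [hW]
        exact List.mem_map_of_mem hx
    unfold PySem.Dict.getD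
    rw [hget]
    rfl
  -- A's fold
  have hcons : PySem.List.pyRange lo (hi + 1) 1 = lo :: PySem.List.pyRange (lo + 1) (hi + 1) 1 :=
    PySem.List.pyRange_one_cons (by omega)
  have hpw : (PySem.List.pyRange lo (hi + 1) 1).Pairwise (· < ·) :=
    PySem.List.pairwise_lt_pyRange_one lo (hi + 1)
  rw [hcons] at hpw
  obtain ⟨rA, hrA, hrAmem, hrAbeats⟩ := pv_A_fold (fun x => PySem.Dict.getD (pvWinDict pc lo (hi + 1)) x 0)
    (PySem.List.pyRange (lo + 1) (hi + 1) 1) lo (List.pairwise_cons.1 hpw).1 (List.pairwise_cons.1 hpw).2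
  have hrAxs : rA ∈ PySem.List.pyRange lo (hi + 1) 1 := by
    rw [hcons]
    rcases hrAmem with rfl | h
    · exact List.mem_cons_self
    · exact List.mem_cons_of_mem _ h
  have hAval : pvMaxOf (pvWinDict pc lo (hi + 1)) = rA := by
    unfold pvMaxOf
    rw [hkeys, hcons, hrA]
    rfl
  -- B's fold
  set pcw := pc.filter (fun t => decide (lo ≤ t.1) && decide (t.1 ≤ hi)) with hpcwdef
  have hwin : ∀ t ∈ pcw, lo ≤ t.1 ∧ t.1 ≤ hi := by
    intro t ht
    have := (List.mem_filter.1 ht).2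
    rw [Bool.and_eq_true, decide_eq_true_eq, decide_eq_true_eq] at this
    exact this
  have hsubl : pcw.Sublist pc := List.filter_sublist
  have hndw : (pcw.map Prod.fst).Nodup :=
    List.Nodup.sublist (hsubl.map Prod.fst) hnd
  have hmem_pcw : ∀ t : Int × Int, t ∈ pcw ↔ (t ∈ pc ∧ lo ≤ t.1 ∧ t.1 ≤ hi) := by
    intro t
    rw [List.mem_filter, Bool.and_eq_true, decide_eq_true_eq, decide_eq_true_eq]
  -- pcw is nonempty: lo is a key
  have hlomem : ∃ t : Int × Int, t ∈ pcw ∧ t.1 = lo := by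
    obtain ⟨t0, ht0, ht0e⟩ := List.mem_map.1 (hcov lo le_rfl hlo)
    exact ⟨t0, (hmem_pcw t0).2 ⟨ht0, by omega⟩, ht0e⟩
  cases hpcw : pcw with
  | nil =>
    obtain ⟨t0, ht0, _⟩ := hlomem
    rw [hpcw] at ht0
    simp at ht0
  | cons p L =>
    have hpmem : p ∈ pcw := by rw [hpcw]; exact List.mem_cons_self
    have hstep0 : pvUpd lo hi none p = some p := by
      have := hwin p hpmem
      simp [pvUpd, this.1, this.2]
    have hndw' : ((p :: L).map Prod.fst).Nodup := by rw [← hpcw]; exact hndw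
    obtain ⟨q, hq, hqmem, hqb⟩ := pv_B_fold lo hi L p hndw'
      (fun t ht => hwin t (by rw [hpcw]; exact ht))
    have hBval : pvBest pc lo hi = q.1 := by
      unfold pvBest
      rw [pv_fuse lo hi pc none, ← hpcwdef, hpcw]
      simp only [List.foldl_cons]
      rw [hstep0, hq]
    -- the two winners coincide
    have hqpcw : q ∈ pcw := by rw [hpcw]; exact hqmem
    have hqpc : q ∈ pc := ((hmem_pcw q).1 hqpcw).1
    have hqxs : q.1 ∈ PySem.List.pyRange lo (hi + 1) 1 := by
      have := ((hmem_pcw q).1 hqpcw).2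
      exact PySem.List.mem_pyRange_one.2 ⟨this.1, by omega⟩
    have hq2 : PySem.Dict.getD ⟨pc⟩ q.1 0 = q.2 := hvmem q.1 q.2 (by rw [Prod.mk.eta]; exact hqpc)
    -- A's winner as an item of pcw
    have hrAwin : lo ≤ rA ∧ rA < hi + 1 := PySem.List.mem_pyRange_one.1 hrAxs
    obtain ⟨t1, ht1, ht1e⟩ := List.mem_map.1 (hcov rA hrAwin.1 (by omega))
    have hvr : PySem.Dict.getD ⟨pc⟩ rA 0 = t1.2 := by
      have : ((rA : Int), t1.2) ∈ pc := by rw [← ht1e, Prod.mk.eta]; exact ht1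
      exact hvmem rA t1.2 this
    have ht1pcw : t1 ∈ pcw := (hmem_pcw t1).2 ⟨ht1, by omega, by omega⟩
    have hq1 : q.1 = rA := by
      by_cases hqt1 : q = t1
      · rw [hqt1, ht1e]
      · have h1 := hqb t1 (by rw [← hpcw]; exact ht1pcw) (fun e => hqt1 (e.symm))
        have h2 := hrAbeats q.1 (by
          rw [hcons] at hqxs
          rcases List.mem_cons.1 hqxs with h | h
          · exact Or.inl h
          · exact Or.inr h)
        rcases h2 with h2 | h2 | h2
        · -- q.1 = rA but q ≠ t1: values force q = t1
          exfalso
          apply hqt1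
          have : q.2 = t1.2 := by rw [← hq2, h2, hvr]
          have he1 : q.1 = t1.1 := by rw [h2, ht1e]
          calc q = (q.1, q.2) := by rw [Prod.mk.eta]
            _ = (t1.1, t1.2) := by rw [this, he1]
            _ = t1 := by rw [Prod.mk.eta]
        · exfalso
          rw [hval q.1 hqxs, hval rA hrAxs, hq2, hvr] at h2
          rw [ht1e] at h1
          omega
        · exfalso
          rw [hval q.1 hqxs, hval rA hrAxs, hq2, hvr] at h2
          rw [ht1e] at h1
          rcases h1 with h1 | h1 <;> rcases h2 with ⟨h2a, h2b⟩ <;> omega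
    rw [hAval, hBval, hq1]

-- ===== VERDICT (by name: the statement is the Claim_ definition above) =====
theorem get_max_pos_spec : Claim_equal_get_max_pos := by
  intro pos_count l r _ hpre
  show get_max_pos pos_count l r = get_max_pos_alt pos_count l r
  have hv : ∀ mp ∈ pos_count, pvBest mp.2 (-|l|) r = pvMaxOf (pvWinDict mp.2 (-|l|) (r + 1)) := by
    intro mp hmp
    obtain ⟨h1, h2, h3⟩ := hpre mp hmp
    refine pv_entry mp.2 (-|l|) r h1 h2 (pv_cover mp.2 (-|l|) r h1 ?_)
    omega
  have houter := pv_outer pvMaxOf (fun mp => pvWinDict mp.2 (-|l|) (r + 1))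
    (fun mp => pvBest mp.2 (-|l|) r) pos_count PySem.Dict.empty PySem.Dict.empty rfl hv
  have hnd2 := pv_keys_fold_nodup (fun mp => pvWinDict mp.2 (-|l|) (r + 1)) pos_count
    PySem.Dict.empty List.nodup_nil
  exact (pv_phase2 _ hnd2).trans houter.symm
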